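-- pv_equiv track=rewrite | github.com/labudevaveronika-wq/Modified_snake | Portal.py | get_free_position
-- ===== SOURCE A (Python) =====
-- def get_free_position(occupied):
--     free_positions = []
--     for x in range(15):
--         for y in range(15):
--             pos = (x , y)
--             if pos not in occupied:
--                 free_positions.append(pos)
--     return free_positions
-- ===== SOURCE B (Python) =====
-- def get_free_position(occupied):
--     free = {(x, y): None for x in range(15) for y in range(15)}
--     for pos in occupied:
--         free.pop(pos, None)
--     return list(free)
-- ===== Notes on version B (the rewrite author's own statement) =====
-- stated objective: alternative
-- what changed: Instead of scanning the occupied list once per grid cell, B builds a dict keyed by every grid cell in one comprehension, deletes the occupied keys with one pass over occupied, and returns the remaining keys in insertion order.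
import Mathlib
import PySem

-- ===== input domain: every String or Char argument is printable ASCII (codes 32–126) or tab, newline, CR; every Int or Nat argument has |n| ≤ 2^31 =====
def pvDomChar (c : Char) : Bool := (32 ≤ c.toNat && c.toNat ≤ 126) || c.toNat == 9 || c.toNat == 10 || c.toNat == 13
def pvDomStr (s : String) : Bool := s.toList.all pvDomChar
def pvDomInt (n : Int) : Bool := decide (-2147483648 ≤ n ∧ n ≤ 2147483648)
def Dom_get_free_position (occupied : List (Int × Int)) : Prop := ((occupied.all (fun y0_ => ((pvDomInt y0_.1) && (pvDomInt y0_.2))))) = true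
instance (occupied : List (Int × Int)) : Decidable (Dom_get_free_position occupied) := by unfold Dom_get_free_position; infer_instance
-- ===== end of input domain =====

set_option maxRecDepth 4000


-- ===== PORT A =====
-- B changes which structure carries the work: a dict of all cells minus one deletion pass, instead of a per-cell membership scan (alternative decomposition).
def get_free_position (occupied : List (Int × Int)) : List (Int × Int) :=
  (PySem.List.pyRange 0 15 1).foldl (fun free_positions x =>
    (PySem.List.pyRange 0 15 1).foldl (fun free_positions y =>
      if !(occupied.contains (x, y)) then free_positions ++ [(x, y)] else free_positions)
      free_positions) []

-- ===== PORT B =====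
-- the keys of the dict comprehension `{(x, y): None for x in range(15) for y in range(15)}`, in insertion order
def pvGridB : List (Int × Int) :=
  (PySem.List.pyRange 0 15 1).flatMap (fun x => (PySem.List.pyRange 0 15 1).map (fun y => (x, y)))

def get_free_position_alt (occupied : List (Int × Int)) : List (Int × Int) :=
  let free : PySem.Dict (Int × Int) (Option Unit) :=
    pvGridB.foldl (fun d p => d.insert p none) PySem.Dict.empty
  -- `free.pop(pos, None)` never raises: with the default it is exactly key deletion
  let free := occupied.foldl (fun d p => d.erase p) free
  free.keys

-- ===== PRECONDITION & SPEC =====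
def Spec_get_free_position (occupied : List (Int × Int)) (out : List (Int × Int)) : Prop := out = get_free_position_alt occupied
instance (occupied : List (Int × Int)) (out : List (Int × Int)) : Decidable (Spec_get_free_position occupied out) := by unfold Spec_get_free_position; infer_instance

-- ===== CLAIM (what is proved, stated in full; the proofs are below) =====
def Claim_equal_get_free_position : Prop := ∀ (occupied : List (Int × Int)), Dom_get_free_position occupied → Spec_get_free_position occupied (get_free_position occupied)

-- ===== LEMMAS AND PROOFS =====

theorem portA_eq_filter (occupied : List (Int × Int)) :
    get_free_position occupied = pvGridB.filter (fun q => !(occupied.contains q)) := by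
  simp only [get_free_position, PySem.List.foldl_append_if, PySem.List.foldl_append_eq_flatMap,
    List.nil_append, pvGridB, List.filter_flatMap, List.filter_map]
  rfl

theorem keys_erase {κ ν : Type} [BEq κ] (d : PySem.Dict κ ν) (k : κ) :
    (d.erase k).keys = d.keys.filter (fun k' => !(k' == k)) := by
  simp only [PySem.Dict.erase, PySem.Dict.keys, List.filter_map]
  rfl

theorem keys_foldl_erase {κ ν : Type} [BEq κ] (occ : List κ) (d : PySem.Dict κ ν) :
    (occ.foldl (fun d p => d.erase p) d).keys = d.keys.filter (fun k => !(occ.contains k)) := by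
  induction occ generalizing d with
  | nil => simp
  | cons p t ih =>
    simp only [List.foldl_cons, ih, keys_erase, List.filter_filter]
    congr 1
    funext k
    simp [Bool.not_or, Bool.and_comm]

theorem nodup_pvGridB : pvGridB.Nodup := by
  have h : pvGridB = (PySem.List.pyRange 0 15 1) ×ˢ (PySem.List.pyRange 0 15 1) := rfl
  rw [h]
  exact List.Nodup.product (PySem.List.nodup_pyRange_one 0 15) (PySem.List.nodup_pyRange_one 0 15)

theorem keys_grid_dict :
    (pvGridB.foldl (fun d p => d.insert p (none : Option Unit)) PySem.Dict.empty).keys = pvGridB := by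
  simp only [PySem.Dict.keys_foldl_insert, PySem.Dict.keys_empty, PySem.Set.update_nil_left]
  exact PySem.Set.ofList_eq_self_of_nodup _ nodup_pvGridB

theorem portB_eq_filter (occupied : List (Int × Int)) :
    get_free_position_alt occupied = pvGridB.filter (fun q => !(occupied.contains q)) := by
  simp only [get_free_position_alt, keys_foldl_erase, keys_grid_dict]

-- ===== VERDICT (by name: the statement is the Claim_ definition above) =====
theorem get_free_position_spec : Claim_equal_get_free_position := by
  intro occupied _
  unfold Spec_get_free_position
  rw [portA_eq_filter, portB_eq_filter]
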